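-- pv_equiv track=rewrite | github.com/etorth/tgdb | tgdb/config_commands.py | _f_args_split
-- ===== SOURCE A (Python) =====
-- def _f_args_split(text: str) -> list[str]:
--     """Split text into f-args tokens with backslash escaping.
--
--     Rules:
--       \\\\  → single backslash
--       \\(space) → literal space (no split)
--       \\X  → \\X unchanged
--       unescaped space/tab → argument separator
--     """
--     args: list[str] = []
--     current: list[str] = []
--     i = 0
--     while i < len(text):
--         c = text[i]
--         if c == "\\" and i + 1 < len(text):
--             nc = text[i + 1]
--             if nc == "\\":
--                 current.append("\\")
--                 i += 2
--             elif nc in (" ", "\t"):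
--                 current.append(nc)
--                 i += 2
--             else:
--                 current.append(c)
--                 current.append(nc)
--                 i += 2
--         elif c in (" ", "\t"):
--             if current:
--                 args.append("".join(current))
--                 current = []
--             while i < len(text) and text[i] in (" ", "\t"):
--                 i += 1
--         else:
--             current.append(c)
--             i += 1
--     if current:
--         args.append("".join(current))
--     return args
-- ===== SOURCE B (Python) =====
-- def _f_args_split(text: str) -> list[str]:
--     # Two-pass: a one-char state machine collects raw tokens (escape pairs kept
--     # verbatim), then each raw token is unescaped; no index arithmetic while splitting.
--     pending = False          # previous char was an escaping backslash
--     cur: list[str] = []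
--     raws: list[list[str]] = []
--     for c in text:
--         if pending:
--             cur.append(c)
--             pending = False
--         elif c == "\\":
--             cur.append(c)
--             pending = True
--         elif c in (" ", "\t"):
--             if cur:
--                 raws.append(cur)
--                 cur = []
--         else:
--             cur.append(c)
--     if cur:
--         raws.append(cur)
--     return ["".join(_unescape(r)) for r in raws]
--
--
-- def _unescape(raw: list[str]) -> list[str]:
--     out: list[str] = []
--     j = 0
--     while j < len(raw):
--         if raw[j] == "\\":
--             if j + 1 == len(raw):
--                 out.append("\\")
--                 j += 1
--             else:
--                 nc = raw[j + 1]
--                 out.append(nc if nc in (" ", "\t", "\\") else "\\" + nc)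
--                 j += 2
--         else:
--             out.append(raw[j])
--             j += 1
--     return out
-- ===== Notes on version B (the rewrite author's own statement) =====
-- stated objective: alternative
-- what changed: Replaces A's single indexed loop (which decodes escapes and splits in one pass with a flush-on-whitespace accumulator) by a two-pass design: a one-character state machine with an escape-carry flag collects raw tokens with escape pairs kept verbatim, then each raw token is unescaped independently.
import Mathlib
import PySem

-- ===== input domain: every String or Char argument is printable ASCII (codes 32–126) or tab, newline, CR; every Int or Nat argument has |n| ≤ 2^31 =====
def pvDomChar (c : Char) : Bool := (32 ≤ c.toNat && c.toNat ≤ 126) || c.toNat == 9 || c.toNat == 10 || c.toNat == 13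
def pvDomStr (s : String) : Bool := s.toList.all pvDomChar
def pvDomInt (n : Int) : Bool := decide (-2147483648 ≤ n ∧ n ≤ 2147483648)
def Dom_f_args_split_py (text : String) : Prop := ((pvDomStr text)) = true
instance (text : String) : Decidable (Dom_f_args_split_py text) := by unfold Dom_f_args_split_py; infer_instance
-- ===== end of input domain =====

-- B replaces A's one-pass indexed escape-decoding splitter by a two-pass design
-- (state-machine raw tokenisation, then per-token unescaping); objective: alternative, same cost.

-- ===== PORT A =====
-- the inner `while i < len(text) and text[i] in (' ', '\t'): i += 1` loop of A
def skipWs : List Char → List Char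
  | [] => []
  | c :: rest => if c = ' ' ∨ c = '\t' then skipWs rest else c :: rest

theorem skipWs_length (cs : List Char) : (skipWs cs).length ≤ cs.length := by
  induction cs with
  | nil => simp [skipWs]
  | cons c rest ih => simp only [skipWs]; split <;> simp <;> omega

-- A's main while-loop; `current`/`args` are the accumulators, the index advance
-- i += 1 / i += 2 becomes recursion on the remaining characters.
def goA : List Char → List Char → List String → List String
  | [], current, args => if current = [] then args else args ++ [String.mk current]
  | c :: rest, current, args =>
    if c = '\\' then
      match rest with
      | nc :: rest2 =>
        if nc = '\\' then goA rest2 (current ++ ['\\']) args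
        else if nc = ' ' ∨ nc = '\t' then goA rest2 (current ++ [nc]) args
        else goA rest2 (current ++ ['\\', nc]) args
      | [] => goA [] (current ++ [c]) args   -- c == '\\' but i+1 == len: Python's final else-branch
    else if c = ' ' ∨ c = '\t' then
      goA (skipWs rest) [] (if current = [] then args else args ++ [String.mk current])
    else goA rest (current ++ [c]) args
termination_by cs _ _ => cs.length
decreasing_by
  all_goals (try simp)
  all_goals (try omega)
  all_goals (exact skipWs_length rest)

def f_args_split_py (text : String) : List String := goA text.toList [] []

-- ===== PORT B =====
-- pass 1 step: the body of B's `for c in text` loop, state (pending, cur, raws)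
def stepB (s : Bool × List Char × List (List Char)) (c : Char) : Bool × List Char × List (List Char) :=
  let (pending, cur, raws) := s
  if pending then (false, cur ++ [c], raws)
  else if c = '\\' then (true, cur ++ [c], raws)
  else if c = ' ' ∨ c = '\t' then
    if cur = [] then (false, [], raws) else (false, [], raws ++ [cur])
  else (false, cur ++ [c], raws)

-- B's final `if cur: raws.append(cur)`
def finishB (s : Bool × List Char × List (List Char)) : List (List Char) :=
  if s.2.1 = [] then s.2.2 else s.2.2 ++ [s.2.1]

-- B's _unescape while-loop (j advances by 1 or 2 → recursion on the rest)
def unescB : List Char → List Char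
  | [] => []
  | c :: rest =>
    if c = '\\' then
      match rest with
      | [] => ['\\']
      | nc :: rest2 =>
        (if nc = ' ' ∨ nc = '\t' ∨ nc = '\\' then [nc] else ['\\', nc]) ++ unescB rest2
    else c :: unescB rest

def f_args_split_py_alt (text : String) : List String :=
  (finishB (text.toList.foldl stepB (false, [], []))).map (fun r => String.mk (unescB r))

-- ===== PRECONDITION & SPEC =====
def Spec_f_args_split_py (text : String) (out : List String) : Prop := out = f_args_split_py_alt text
instance (text : String) (out : List String) : Decidable (Spec_f_args_split_py text out) := by unfold Spec_f_args_split_py; infer_instance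

-- ===== CLAIM (what is proved, stated in full; the proofs are below) =====
def Claim_equal_f_args_split_py : Prop := ∀ (text : String), Dom_f_args_split_py text → Spec_f_args_split_py text (f_args_split_py text)

-- ===== LEMMAS AND PROOFS =====

-- well-formed raw token: every backslash starts a complete escape pair
-- (so unescaping distributes over appending further complete units)
def wfb : List Char → Bool
  | [] => true
  | c :: rest =>
    if c = '\\' then
      match rest with
      | [] => false
      | _ :: rest2 => wfb rest2
    else wfb rest

-- equation lemmas for the match/if-compiled definitions
theorem unescB_nil : unescB [] = [] := by rw [unescB.eq_def]
theorem unescB_cons_ne (c : Char) (rest : List Char) (hc : ¬ c = '\\') :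
    unescB (c :: rest) = c :: unescB rest := by rw [unescB.eq_def]; simp [hc]
theorem unescB_esc (nc : Char) (rest2 : List Char) :
    unescB ('\\' :: nc :: rest2) =
      (if nc = ' ' ∨ nc = '\t' ∨ nc = '\\' then [nc] else ['\\', nc]) ++ unescB rest2 := by
  rw [unescB.eq_def]; simp
theorem unescB_bs : unescB ['\\'] = ['\\'] := by rw [unescB.eq_def]; simp
theorem wfb_cons_ne (c : Char) (rest : List Char) (hc : ¬ c = '\\') :
    wfb (c :: rest) = wfb rest := by rw [wfb.eq_def]; simp [hc]
theorem wfb_esc (nc : Char) (rest2 : List Char) : wfb ('\\' :: nc :: rest2) = wfb rest2 := by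
  rw [wfb.eq_def]; simp
theorem wfb_bs : wfb ['\\'] = false := by rw [wfb.eq_def]; simp
theorem goA_nil (current : List Char) (args : List String) :
    goA [] current args = if current = [] then args else args ++ [String.mk current] := by
  rw [goA.eq_def]
theorem goA_esc (nc : Char) (rest2 current : List Char) (args : List String) :
    goA ('\\' :: nc :: rest2) current args =
      if nc = '\\' then goA rest2 (current ++ ['\\']) args
      else if nc = ' ' ∨ nc = '\t' then goA rest2 (current ++ [nc]) args
      else goA rest2 (current ++ ['\\', nc]) args := by
  rw [goA.eq_def]; simp
theorem goA_bs (current : List Char) (args : List String) :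
    goA ['\\'] current args = goA [] (current ++ ['\\']) args := by
  rw [goA.eq_def]; simp
theorem goA_ws (c : Char) (rest current : List Char) (args : List String)
    (hc : ¬ c = '\\') (hws : c = ' ' ∨ c = '\t') :
    goA (c :: rest) current args =
      goA (skipWs rest) [] (if current = [] then args else args ++ [String.mk current]) := by
  rw [goA.eq_def]; simp [hc, hws]
theorem goA_other (c : Char) (rest current : List Char) (args : List String)
    (hc : ¬ c = '\\') (hws : ¬ (c = ' ' ∨ c = '\t')) :
    goA (c :: rest) current args = goA rest (current ++ [c]) args := by
  rw [goA.eq_def]; simp [hc, hws]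

theorem unescB_ne_nil (c : Char) (rest : List Char) : unescB (c :: rest) ≠ [] := by
  by_cases hc : c = '\\'
  · subst hc
    match rest with
    | [] => rw [unescB_bs]; simp
    | nc :: rest2 => rw [unescB_esc]; split <;> simp
  · rw [unescB_cons_ne _ _ hc]; simp

theorem unescB_eq_nil_iff (cs : List Char) : unescB cs = [] ↔ cs = [] := by
  cases cs with
  | nil => simp [unescB_nil]
  | cons c rest => simp [unescB_ne_nil c rest]

theorem wfb_append : ∀ (x y : List Char), wfb x = true → wfb y = true → wfb (x ++ y) = true
  | [], _, _, hy => hy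
  | [c], y, hx, hy => by
    have hc : ¬ c = '\\' := by
      intro h; subst h; rw [wfb_bs] at hx; exact absurd hx (by simp)
    rw [List.singleton_append, wfb_cons_ne _ _ hc]; exact hy
  | c :: d :: x', y, hx, hy => by
    by_cases hc : c = '\\'
    · subst hc
      rw [wfb_esc] at hx
      rw [List.cons_append, List.cons_append, wfb_esc]
      exact wfb_append x' y hx hy
    · rw [wfb_cons_ne _ _ hc] at hx
      rw [List.cons_append, wfb_cons_ne _ _ hc]
      exact wfb_append (d :: x') y hx hy
termination_by x _ _ _ => x.length
decreasing_by all_goals simp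

theorem unescB_append : ∀ (x y : List Char), wfb x = true → unescB (x ++ y) = unescB x ++ unescB y
  | [], y, _ => by rw [List.nil_append, unescB_nil, List.nil_append]
  | [c], y, hx => by
    have hc : ¬ c = '\\' := by
      intro h; subst h; rw [wfb_bs] at hx; exact absurd hx (by simp)
    rw [List.singleton_append, unescB_cons_ne _ _ hc, unescB_cons_ne _ _ hc, unescB_nil]
    rfl
  | c :: d :: x', y, hx => by
    by_cases hc : c = '\\'
    · subst hc
      rw [wfb_esc] at hx
      rw [List.cons_append, List.cons_append, unescB_esc, unescB_esc,
        unescB_append x' y hx, List.append_assoc]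
    · rw [wfb_cons_ne _ _ hc] at hx
      rw [List.cons_append, unescB_cons_ne _ _ hc, unescB_cons_ne _ _ hc,
        unescB_append (d :: x') y hx]
      rfl
termination_by x _ _ => x.length
decreasing_by all_goals simp

theorem stepB_raws (p : Bool) (cur : List Char) (raws : List (List Char)) (c : Char) :
    stepB (p, cur, raws) c =
      ((stepB (p, cur, []) c).1, (stepB (p, cur, []) c).2.1,
        raws ++ (stepB (p, cur, []) c).2.2) := by
  simp only [stepB]
  split_ifs <;> simp

theorem foldl_factor (cs : List Char) : ∀ (p : Bool) (cur : List Char) (raws : List (List Char)),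
    List.foldl stepB (p, cur, raws) cs =
      ((List.foldl stepB (p, cur, []) cs).1,
       (List.foldl stepB (p, cur, []) cs).2.1,
       raws ++ (List.foldl stepB (p, cur, []) cs).2.2) := by
  induction cs with
  | nil => intro p cur raws; simp
  | cons c cs ih =>
    intro p cur raws
    rw [List.foldl_cons, List.foldl_cons, stepB_raws]
    rcases h0 : stepB (p, cur, []) c with ⟨q, cur', r1⟩
    have IH1 := ih q cur' (raws ++ r1)
    have IH2 := ih q cur' r1
    rw [IH1, IH2]
    simp

theorem foldl_skipWs (cs : List Char) (raws : List (List Char)) :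
    List.foldl stepB (false, [], raws) (skipWs cs) = List.foldl stepB (false, [], raws) cs := by
  induction cs generalizing raws with
  | nil => simp [skipWs]
  | cons c cs ih =>
    simp only [skipWs]
    split
    · rename_i hws
      have hc : ¬ c = '\\' := by
        rcases hws with h | h <;> subst h <;> decide
      rw [List.foldl_cons]
      have hstep : stepB (false, ([] : List Char), raws) c = (false, [], raws) := by
        simp [stepB, hc, hws]
      rw [hstep, ih]
    · rfl

theorem finishB_factor (q : Bool) (cur : List Char) (r0 r : List (List Char)) :
    finishB (q, cur, r0 ++ r) = r0 ++ finishB (q, cur, r) := by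
  simp only [finishB]
  split <;> simp

theorem goA_eq_B : ∀ (cs rcur : List Char) (args : List String), wfb rcur = true →
    goA cs (unescB rcur) args =
      args ++ (finishB (List.foldl stepB (false, rcur, []) cs)).map (fun r => String.mk (unescB r))
  | [], rcur, args, hw => by
    rw [goA_nil, List.foldl_nil]
    rcases eq_or_ne rcur [] with h | h
    · subst h; simp [unescB_nil, finishB]
    · rw [if_neg ((not_iff_not.mpr (unescB_eq_nil_iff rcur)).mpr h)]
      simp [finishB, h]
  | c :: rest, rcur, args, hw => by
    by_cases hc : c = '\\'
    · subst hc
      match rest with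
      | [] =>
        -- cs = ['\\']: the lone trailing backslash is kept
        rw [goA_bs, goA_nil, List.foldl_cons, List.foldl_nil]
        have hu : unescB (rcur ++ ['\\']) = unescB rcur ++ ['\\'] := by
          rw [unescB_append rcur ['\\'] hw, unescB_bs]
        have hstep : stepB (false, rcur, ([] : List (List Char))) '\\' = (true, rcur ++ ['\\'], []) := by
          simp [stepB]
        rw [hstep, if_neg (by simp : ¬ (unescB rcur ++ ['\\'] = []))]
        simp [finishB, hu]
      | nc :: rest2 =>
        rw [goA_esc]
        have hw2 : wfb (rcur ++ ['\\', nc]) = true :=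
          wfb_append rcur ['\\', nc] hw (by rw [wfb_esc]; rfl)
        have hu : unescB (rcur ++ ['\\', nc]) =
            unescB rcur ++ (if nc = ' ' ∨ nc = '\t' ∨ nc = '\\' then [nc] else ['\\', nc]) := by
          rw [unescB_append rcur ['\\', nc] hw, unescB_esc, unescB_nil, List.append_nil]
        have IH := goA_eq_B rest2 (rcur ++ ['\\', nc]) args hw2
        rw [hu] at IH
        have hfold : List.foldl stepB (false, rcur, ([] : List (List Char))) ('\\' :: nc :: rest2) =
            List.foldl stepB (false, rcur ++ ['\\', nc], []) rest2 := by
          rw [List.foldl_cons, List.foldl_cons,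
            (by simp [stepB] : stepB (false, rcur, ([] : List (List Char))) '\\' = (true, rcur ++ ['\\'], [])),
            (by simp [stepB] : stepB (true, rcur ++ ['\\'], ([] : List (List Char))) nc = (false, rcur ++ ['\\'] ++ [nc], [])),
            List.append_assoc]
          rfl
        rw [hfold]
        by_cases h1 : nc = '\\'
        · subst h1
          rw [if_pos rfl]
          rw [if_pos (by simp : ('\\' = ' ' ∨ '\\' = '\t' ∨ '\\' = '\\'))] at IH
          exact IH
        · by_cases h2 : nc = ' ' ∨ nc = '\t'
          · rw [if_neg h1, if_pos h2]
            rw [if_pos (by tauto : (nc = ' ' ∨ nc = '\t' ∨ nc = '\\'))] at IH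
            exact IH
          · rw [if_neg h1, if_neg h2]
            rw [if_neg (by tauto : ¬ (nc = ' ' ∨ nc = '\t' ∨ nc = '\\'))] at IH
            exact IH
    · by_cases hws : c = ' ' ∨ c = '\t'
      · -- unescaped whitespace: A flushes `current`, B closes the raw token
        rw [goA_ws c rest _ args hc hws]
        have IH := goA_eq_B (skipWs rest) []
          (if unescB rcur = [] then args else args ++ [String.mk (unescB rcur)]) rfl
        rw [unescB_nil, foldl_skipWs] at IH
        rw [IH, List.foldl_cons]
        have hstep : stepB (false, rcur, ([] : List (List Char))) c =
            (false, [], if rcur = [] then [] else [rcur]) := by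
          simp only [stepB, if_neg (by simp : ¬ (false = true)), if_neg hc, if_pos hws]
          split <;> simp_all
        rw [hstep, foldl_factor rest false [] (if rcur = [] then [] else [rcur])]
        rcases hY : List.foldl stepB (false, ([] : List Char), ([] : List (List Char))) rest with ⟨q, cur', r'⟩
        rw [finishB_factor]
        rcases eq_or_ne rcur [] with h | h
        · subst h; simp [unescB_nil]
        · rw [if_neg ((not_iff_not.mpr (unescB_eq_nil_iff rcur)).mpr h), if_neg h]
          simp
      · -- ordinary character
        rw [goA_other c rest _ args hc hws]
        have hw2 : wfb (rcur ++ [c]) = true :=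
          wfb_append rcur [c] hw (by rw [wfb_cons_ne _ _ hc, wfb.eq_def])
        have hu : unescB (rcur ++ [c]) = unescB rcur ++ [c] := by
          rw [unescB_append rcur [c] hw, unescB_cons_ne _ _ hc, unescB_nil]
        have IH := goA_eq_B rest (rcur ++ [c]) args hw2
        rw [hu] at IH
        have hstep : stepB (false, rcur, ([] : List (List Char))) c = (false, rcur ++ [c], []) := by
          simp [stepB, hc, hws]
        rw [List.foldl_cons, hstep]
        exact IH
termination_by cs _ _ _ => cs.length
decreasing_by
  all_goals (try simp)
  all_goals (try omega)
  all_goals (have := skipWs_length rest; omega)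

-- ===== VERDICT (by name: the statement is the Claim_ definition above) =====
theorem f_args_split_py_spec : Claim_equal_f_args_split_py := by
  intro text _
  unfold Spec_f_args_split_py f_args_split_py f_args_split_py_alt
  have h := goA_eq_B text.toList [] [] rfl
  rw [unescB_nil] at h
  simpa using h
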